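-- pv_equiv track=rewrite | github.com/LeonardTopno/python-coding-practice | min_inversions_needed_for_balanced_str.py | count_min_inversions
-- ===== SOURCE A (Python) =====
-- def count_min_inversions(exp):
--
--     # if the expression has an odd length, it cannot be balanced
--     if len(exp) % 2:
--         return -1
--
--     inversions = 0  # stores all inversions needed
--     open_ = 0  # stores number of opening braces
--
--     # traversing the expression
--     for i in range(len(exp)):
--
--         # if the current character is an opening brace, add it to the count
--         if exp[i] == "{":
--             open_ += 1
--
--         # if the current character is a closing brace,
--         else:
--             # if an opening brace is found before, close it
--             if open_:  # if the count of open braces is non-zero, i.e. previous elem is an open brace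
--                 open_ -= 1
--
--             # when there are no open braces found currently, convert the current brace } to {,
--             # increment inversions by 1 and open_ by 1
--             else:
--                 inversions += 1
--
--                 open_ += 1  # Leo: I guess it can also be open_ += 1 (it can just be open_ = 1
--                 # because it is 0 atm (0+1=0))
--
--     # for `n` opened braces, exactly `n/2` inversions are needed
--     return inversions + (open_ // 2)
-- ===== SOURCE B (Python) =====
-- def count_min_inversions(exp):
--     # prefix-sum formulation: score '{' as +1 and any other char as -1,
--     # track the running total and its minimum; no conditional matching at all.
--     # With low = min prefix sum (<= 0), the unmatched closes are -low and the
--     # unmatched opens are total - low, so the answer is ceil(-low/2) + ceil((total-low)/2).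
--     if len(exp) % 2:
--         return -1
--     total = 0
--     low = 0
--     for ch in exp:
--         total += 1 if ch == "{" else -1
--         if total < low:
--             low = total
--     return (1 - low) // 2 + (total - low + 1) // 2
-- ===== Notes on version B (the rewrite author's own statement) =====
-- stated objective: alternative
-- what changed: B replaces A's greedy branch-on-counter matching (if open: match else convert-and-count) with an unconditional prefix-sum scan (+1 for '{', -1 otherwise) that tracks only the running total and its minimum, and derives the answer from the closed form ceil(-low/2)+ceil((total-low)/2).
import Mathlib
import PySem

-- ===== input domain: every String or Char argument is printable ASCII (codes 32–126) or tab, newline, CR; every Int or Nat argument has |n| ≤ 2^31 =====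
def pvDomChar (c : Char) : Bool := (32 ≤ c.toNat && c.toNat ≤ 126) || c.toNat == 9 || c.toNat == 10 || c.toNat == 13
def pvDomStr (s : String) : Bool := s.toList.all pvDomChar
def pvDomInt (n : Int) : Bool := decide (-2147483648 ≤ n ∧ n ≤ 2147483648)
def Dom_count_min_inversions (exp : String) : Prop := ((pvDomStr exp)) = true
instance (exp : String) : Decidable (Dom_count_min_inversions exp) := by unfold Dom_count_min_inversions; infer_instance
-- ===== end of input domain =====

-- B replaces A's greedy branch-on-counter matching by an unconditional prefix-sum scan
-- (+1 / -1 per character) tracking the running total and its minimum, with the closed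
-- form ceil(-low/2)+ceil((total-low)/2); objective: alternative (same cost).

-- ===== PORT A =====
-- loop body of A: state (inversions, open_)
def pvStepA (s : Int × Int) (ch : Char) : Int × Int :=
  if ch = '{' then (s.1, s.2 + 1)
  else if s.2 ≠ 0 then (s.1, s.2 - 1)
  else (s.1 + 1, s.2 + 1)

def count_min_inversions (exp : String) : Int :=
  if PySem.Int.mod (PySem.Str.len exp) 2 ≠ 0 then -1
  else
    let st := exp.toList.foldl pvStepA (0, 0)
    st.1 + PySem.Int.floordiv st.2 2

-- ===== PORT B =====
-- loop body of B: state (total, low); 'total += ±1; if total < low: low = total'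
def pvStepB (s : Int × Int) (ch : Char) : Int × Int :=
  (s.1 + (if ch = '{' then 1 else -1),
   if s.1 + (if ch = '{' then 1 else -1) < s.2 then s.1 + (if ch = '{' then 1 else -1) else s.2)

def count_min_inversions_alt (exp : String) : Int :=
  if PySem.Int.mod (PySem.Str.len exp) 2 ≠ 0 then -1
  else
    let st := exp.toList.foldl pvStepB (0, 0)
    PySem.Int.floordiv (1 - st.2) 2 + PySem.Int.floordiv (st.1 - st.2 + 1) 2

-- ===== PRECONDITION & SPEC =====
def Spec_count_min_inversions (exp : String) (out : Int) : Prop := out = count_min_inversions_alt exp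
instance (exp : String) (out : Int) : Decidable (Spec_count_min_inversions exp out) := by unfold Spec_count_min_inversions; infer_instance

-- ===== CLAIM =====
def Claim_equal_count_min_inversions : Prop := ∀ (exp : String), Dom_count_min_inversions exp → Spec_count_min_inversions exp (count_min_inversions exp)

-- ===== LEMMAS AND PROOFS =====

-- Invariant: A's state (inversions, open_) is determined by B's (total, low):
-- inversions = (1-low)/2, open_ = (total-low) + (-low)%2; low stays ≤ 0 and ≤ total,
-- and total flips parity once per character.
lemma pv_loop_rel (cs : List Char) : ∀ (t low : Int), low ≤ 0 → low ≤ t →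
    List.foldl pvStepA ((1 - low) / 2, (t - low) + (-low) % 2) cs
      = ((1 - (List.foldl pvStepB (t, low) cs).2) / 2,
         ((List.foldl pvStepB (t, low) cs).1 - (List.foldl pvStepB (t, low) cs).2)
           + (-(List.foldl pvStepB (t, low) cs).2) % 2)
    ∧ (List.foldl pvStepB (t, low) cs).2 ≤ 0
    ∧ (List.foldl pvStepB (t, low) cs).2 ≤ (List.foldl pvStepB (t, low) cs).1
    ∧ ((List.foldl pvStepB (t, low) cs).1 + (cs.length : Int)) % 2 = t % 2 := by
  induction cs with
  | nil => intro t low h0 ht; exact ⟨rfl, h0, ht, by simp⟩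
  | cons ch rest ih =>
    intro t low h0 ht
    simp only [List.foldl_cons, List.length_cons]
    by_cases hch : ch = '{'
    · rw [show pvStepB (t, low) ch = (t + 1, low) by
        unfold pvStepB; rw [if_pos hch, if_neg (by omega)],
        show pvStepA ((1 - low) / 2, (t - low) + (-low) % 2) ch
            = ((1 - low) / 2, ((t + 1) - low) + (-low) % 2) by
        unfold pvStepA; rw [if_pos hch, Prod.mk.injEq]; exact ⟨rfl, by ring⟩]
      obtain ⟨e, b1, b2, p⟩ := ih (t + 1) low h0 (by omega)
      exact ⟨e, b1, b2, by push_cast at p ⊢; omega⟩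
    · by_cases hlo : t - 1 < low
      · -- t = low: the prefix minimum drops
        have htl : t = low := by omega
        rw [show pvStepB (t, low) ch = (low - 1, low - 1) by
          unfold pvStepB; rw [if_neg hch, if_pos (by omega), Prod.mk.injEq]
          exact ⟨by omega, by omega⟩]
        by_cases hpar : low % 2 = 0
        · -- open_ = 0: A converts the close (inversions+1, open_+1)
          rw [show pvStepA ((1 - low) / 2, (t - low) + (-low) % 2) ch
              = ((1 - (low - 1)) / 2, ((low - 1) - (low - 1)) + (-(low - 1)) % 2) by
            unfold pvStepA; rw [if_neg hch, if_neg (by omega), Prod.mk.injEq]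
            exact ⟨by omega, by omega⟩]
          obtain ⟨e, b1, b2, p⟩ := ih (low - 1) (low - 1) (by omega) le_rfl
          exact ⟨e, b1, b2, by push_cast at p ⊢; omega⟩
        · -- open_ = 1 (A's leftover phantom open absorbs the close)
          rw [show pvStepA ((1 - low) / 2, (t - low) + (-low) % 2) ch
              = ((1 - (low - 1)) / 2, ((low - 1) - (low - 1)) + (-(low - 1)) % 2) by
            unfold pvStepA; rw [if_neg hch, if_pos (by omega), Prod.mk.injEq]
            exact ⟨by omega, by omega⟩]
          obtain ⟨e, b1, b2, p⟩ := ih (low - 1) (low - 1) (by omega) le_rfl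
          exact ⟨e, b1, b2, by push_cast at p ⊢; omega⟩
      · -- t - 1 ≥ low: the minimum is unchanged, A has an open to match
        rw [show pvStepB (t, low) ch = (t - 1, low) by
          unfold pvStepB; rw [if_neg hch, if_neg (by omega), Prod.mk.injEq]
          exact ⟨by omega, rfl⟩,
          show pvStepA ((1 - low) / 2, (t - low) + (-low) % 2) ch
              = ((1 - low) / 2, ((t - 1) - low) + (-low) % 2) by
          unfold pvStepA; rw [if_neg hch, if_pos (by omega), Prod.mk.injEq]
          exact ⟨rfl, by omega⟩]
        obtain ⟨e, b1, b2, p⟩ := ih (t - 1) low h0 (by omega)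
        exact ⟨e, b1, b2, by push_cast at p ⊢; omega⟩

lemma pv_fd2 (a : Int) : PySem.Int.floordiv a 2 = a / 2 :=
  PySem.Int.floordiv_eq_ediv_of_pos (by norm_num)

lemma pv_md2 (a : Int) : PySem.Int.mod a 2 = a % 2 :=
  PySem.Int.mod_eq_emod_of_pos (by norm_num)

-- ===== VERDICT =====
theorem count_min_inversions_spec : Claim_equal_count_min_inversions := by
  intro exp _
  unfold Spec_count_min_inversions count_min_inversions count_min_inversions_alt
  by_cases hodd : PySem.Int.mod (PySem.Str.len exp) 2 ≠ 0
  · rw [if_pos hodd, if_pos hodd]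
  · rw [if_neg hodd, if_neg hodd]
    obtain ⟨e, b1, b2, p⟩ := pv_loop_rel exp.toList 0 0 le_rfl le_rfl
    have e0 : List.foldl pvStepA (0, 0) exp.toList
        = ((1 - (List.foldl pvStepB (0, 0) exp.toList).2) / 2,
           ((List.foldl pvStepB (0, 0) exp.toList).1 - (List.foldl pvStepB (0, 0) exp.toList).2)
             + (-(List.foldl pvStepB (0, 0) exp.toList).2) % 2) := by
      rw [← e]; norm_num
    have hlen : PySem.Str.len exp = (exp.toList.length : Int) := by
      simp [PySem.Str.len]
    rw [hlen, pv_md2] at hodd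
    simp only [ne_eq, not_not] at hodd
    simp only [e0, pv_fd2]
    push_cast at p
    omega
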